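-- pv_equiv track=rewrite | github.com/KolyaYashin/study | karpov_simulator_ds/easy/matching.py | extend_matches
-- ===== SOURCE A (Python) =====
-- from typing import List
-- from typing import Tuple
--
-- def find_connected_components(pairs):
--     from collections import defaultdict, deque
--
--     # Построение графа в виде списка смежности
--     graph = defaultdict(list)
--     for u, v in pairs:
--         graph[u].append(v)
--         graph[v].append(u)
--
--     # Функция для выполнения DFS
--     def dfs(node, visited, component):
--         stack = [node]
--         while stack:
--             current = stack.pop()
--             if current not in visited:
--                 visited.add(current)
--                 component.append(current)
--                 for neighbor in graph[current]:
--                     if neighbor not in visited: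
--                         stack.append(neighbor)
--
--     visited = set()
--     components = []
--
--     # Выполнение DFS для всех узлов
--     for node in graph:
--         if node not in visited:
--             component = []
--             dfs(node, visited, component)
--             components.append(component)
--
--     return components
--
-- def extend_matches(pairs: List[Tuple[int, int]]) -> List[Tuple[int, int]]:
--     components = find_connected_components(pairs=pairs)
--     pairs = set()
--
--     for component in components:
--         for i in range(len(component)):
--             for j in range(i+1, len(component)):
--                 if (component[i], component[j]) not in pairs and (component[j], component[i]) not in pairs:
--                     if component[j] >= component[i]:
--                         pairs.add((component[i], component[j]))
--                     else:
--                         pairs.add((component[j], component[i]))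
--
--     return sorted(pairs)
-- ===== SOURCE B (Python) =====
-- from typing import List
-- from typing import Tuple
--
-- def extend_matches(pairs: List[Tuple[int, int]]) -> List[Tuple[int, int]]:
--     # Incremental group merging: fold over the pairs keeping a partition of the
--     # nodes seen so far; no adjacency graph, no DFS stack.
--     groups = []
--     for u, v in pairs:
--         merged = [x for g in groups if (u in g or v in g) for x in g]
--         for x in (u, v):
--             if x not in merged:
--                 merged.append(x)
--         groups = [g for g in groups if u not in g and v not in g] + [merged]
--     res = set()
--     for g in groups:
--         for a in g:
--             for b in g:
--                 if a < b:
--                     res.add((a, b))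
--     return sorted(res)
-- ===== Notes on version B (the rewrite author's own statement) =====
-- stated objective: alternative
-- what changed: Replaces the adjacency-dict + explicit-stack DFS component search by an incremental partition merge (fold over the pairs keeping disjoint groups, merging every group that touches an endpoint), and emits each group's pairs with a plain double loop guarded by a<b instead of index ranges with a membership pre-check.
import Mathlib
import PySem

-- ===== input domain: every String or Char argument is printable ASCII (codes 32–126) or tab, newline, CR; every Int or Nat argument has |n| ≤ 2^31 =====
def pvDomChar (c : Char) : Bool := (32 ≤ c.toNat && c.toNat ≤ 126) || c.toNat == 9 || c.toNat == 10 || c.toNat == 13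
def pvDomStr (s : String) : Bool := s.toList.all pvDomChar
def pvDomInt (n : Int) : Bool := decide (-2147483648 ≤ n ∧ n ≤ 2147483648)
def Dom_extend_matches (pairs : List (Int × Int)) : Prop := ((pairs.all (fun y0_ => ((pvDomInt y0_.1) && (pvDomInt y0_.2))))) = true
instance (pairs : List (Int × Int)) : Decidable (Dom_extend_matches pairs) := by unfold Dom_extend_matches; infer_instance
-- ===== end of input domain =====

-- B replaces the adjacency-dict + explicit-stack DFS by an incremental partition merge over
-- the pairs and a plain a<b double loop per group (alternative algorithm, same result).


-- ===== PORT A =====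
-- graph[u].append(v); graph[v].append(u)   (defaultdict(list))
def pvGraphAdd (g : PySem.Dict Int (List Int)) (p : Int × Int) : PySem.Dict Int (List Int) :=
  let g1 := g.modify p.1 [] (· ++ [p.2])
  g1.modify p.2 [] (· ++ [p.1])

-- the while-stack DFS loop; the stack is kept TOP-AT-HEAD (Python appends/pops at the end),
-- so Python's in-order appends become 'reverse ++ rest'; fuel only makes the loop total
def pvDfs (g : PySem.Dict Int (List Int)) : Nat → List Int → PySem.Set Int → List Int →
    PySem.Set Int × List Int
  | 0, _, vis, comp => (vis, comp)
  | fuel + 1, stack, vis, comp =>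
    match stack with
    | [] => (vis, comp)
    | current :: rest =>
      if PySem.Set.contains vis current then
        pvDfs g fuel rest vis comp
      else
        let vis' := PySem.Set.add vis current
        let comp' := comp ++ [current]
        pvDfs g fuel
          (((g.getD current []).filter (fun nb => !(PySem.Set.contains vis' nb))).reverse ++ rest)
          vis' comp'

-- fuel bound for one dfs call: |stack| + Σ over unvisited keys of (1 + len(adjacency))
def pvPhi (g : PySem.Dict Int (List Int)) (vis : PySem.Set Int) (stack : List Int) : Nat :=
  stack.length +
    ((g.keys.filter (fun k => !(PySem.Set.contains vis k))).map
      (fun k => (g.getD k []).length + 1)).sum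

def pvComponents (pairs : List (Int × Int)) : List (List Int) :=
  let g := pairs.foldl pvGraphAdd PySem.Dict.empty
  (g.keys.foldl
    (fun (st : PySem.Set Int × List (List Int)) node =>
      if PySem.Set.contains st.1 node then st
      else
        match pvDfs g (pvPhi g st.1 [node]) [node] st.1 [] with
        | (vis', comp) => (vis', st.2 ++ [comp]))
    (PySem.Set.empty, [])).2

-- the two nested range(i..)/range(i+1..) loops with the membership pre-check
def pvAddPairs (s : PySem.Set (Int × Int)) (comp : List Int) : PySem.Set (Int × Int) :=
  (PySem.List.pyRange 0 comp.length).foldl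
    (fun s i =>
      (PySem.List.pyRange (i + 1) comp.length).foldl
        (fun s j =>
          let ci := PySem.List.pyGetD comp i 0
          let cj := PySem.List.pyGetD comp j 0
          if !(PySem.Set.contains s (ci, cj)) && !(PySem.Set.contains s (cj, ci)) then
            if cj ≥ ci then PySem.Set.add s (ci, cj) else PySem.Set.add s (cj, ci)
          else s)
        s)
    s

def extend_matches (pairs : List (Int × Int)) : List (Int × Int) :=
  let components := pvComponents pairs
  let s := components.foldl pvAddPairs PySem.Set.empty
  PySem.List.sorted s (fun p => toLex p) false   -- sorted(pairs): tuples compare lexicographically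

-- ===== PORT B =====
-- one pair processed: every group touching u or v is folded into one merged group
def pvMergeStep (groups : List (List Int)) (p : Int × Int) : List (List Int) :=
  let merged := (groups.filter (fun g => g.contains p.1 || g.contains p.2)).flatMap id
  let merged1 := if p.1 ∈ merged then merged else merged ++ [p.1]
  let merged2 := if p.2 ∈ merged1 then merged1 else merged1 ++ [p.2]
  (groups.filter (fun g => !(g.contains p.1) && !(g.contains p.2))) ++ [merged2]

-- for a in g: for b in g: if a < b: res.add((a, b))
def pvEmit (res : PySem.Set (Int × Int)) (g : List Int) : PySem.Set (Int × Int) :=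
  g.foldl (fun res a => g.foldl (fun res b => if a < b then PySem.Set.add res (a, b) else res) res) res

def extend_matches_alt (pairs : List (Int × Int)) : List (Int × Int) :=
  let groups := pairs.foldl pvMergeStep []
  let res := groups.foldl pvEmit PySem.Set.empty
  PySem.List.sorted res (fun p => toLex p) false

-- ===== PRECONDITION & SPEC =====
def Spec_extend_matches (pairs : List (Int × Int)) (out : List (Int × Int)) : Prop := out = extend_matches_alt pairs
instance (pairs : List (Int × Int)) (out : List (Int × Int)) : Decidable (Spec_extend_matches pairs out) := by unfold Spec_extend_matches; infer_instance

-- ===== CLAIM (what is proved, stated in full; the proofs are below) =====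
def Claim_equal_extend_matches : Prop := ∀ (pairs : List (Int × Int)), Dom_extend_matches pairs → Spec_extend_matches pairs (extend_matches pairs)

-- ===== LEMMAS AND PROOFS =====

def pvRel (P : List (Int × Int)) (a b : Int) : Prop := (a, b) ∈ P ∨ (b, a) ∈ P

def pvConn (P : List (Int × Int)) : Int → Int → Prop := Relation.ReflTransGen (pvRel P)

theorem pvRel_symm (P : List (Int × Int)) : Symmetric (pvRel P) := by
  intro a b h; exact h.elim Or.inr Or.inl

theorem pvConn_symm (P : List (Int × Int)) {a b : Int} (h : pvConn P a b) : pvConn P b a :=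
  Relation.ReflTransGen.symmetric (pvRel_symm P) h

theorem pvConn_trans (P : List (Int × Int)) {a b c : Int} (h1 : pvConn P a b)
    (h2 : pvConn P b c) : pvConn P a c := Relation.ReflTransGen.trans h1 h2

theorem pvConn_head (P : List (Int × Int)) {a b : Int} (h : pvConn P a b) (hne : a ≠ b) :
    ∃ z, pvRel P a z := by
  rcases Relation.ReflTransGen.cases_head h with h | ⟨z, hz, _⟩
  · exact absurd h hne
  · exact ⟨z, hz⟩

theorem pvRel_append (P : List (Int × Int)) (u v a b : Int) :
    pvRel (P ++ [(u, v)]) a b ↔ pvRel P a b ∨ (a = u ∧ b = v) ∨ (a = v ∧ b = u) := by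
  simp [pvRel, Prod.ext_iff]; tauto

theorem pvConn_mono (P : List (Int × Int)) (u v : Int) {a b : Int} (h : pvConn P a b) :
    pvConn (P ++ [(u, v)]) a b :=
  Relation.ReflTransGen.mono (fun _ _ hr => (pvRel_append P u v _ _).2 (Or.inl hr)) h

theorem pvConn_edge (P : List (Int × Int)) (u v : Int) : pvConn (P ++ [(u, v)]) u v :=
  Relation.ReflTransGen.single ((pvRel_append P u v u v).2 (Or.inr (Or.inl ⟨rfl, rfl⟩)))

theorem pvConn_append (P : List (Int × Int)) (u v a b : Int) :
    pvConn (P ++ [(u, v)]) a b ↔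
      pvConn P a b ∨ (pvConn P a u ∧ pvConn P v b) ∨ (pvConn P a v ∧ pvConn P u b) := by
  constructor
  · intro h
    induction h with
    | refl => exact Or.inl Relation.ReflTransGen.refl
    | @tail c d h1 h2 ih =>
      rcases (pvRel_append P u v c d).1 h2 with hr | ⟨rfl, rfl⟩ | ⟨rfl, rfl⟩
      · rcases ih with h | ⟨h1', h2'⟩ | ⟨h1', h2'⟩
        · exact Or.inl (h.tail hr)
        · exact Or.inr (Or.inl ⟨h1', h2'.tail hr⟩)
        · exact Or.inr (Or.inr ⟨h1', h2'.tail hr⟩)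
      · rcases ih with h | ⟨h1', h2'⟩ | ⟨h1', h2'⟩
        · exact Or.inr (Or.inl ⟨h, Relation.ReflTransGen.refl⟩)
        · exact Or.inr (Or.inl ⟨h1', Relation.ReflTransGen.refl⟩)
        · exact Or.inl h1'
      · rcases ih with h | ⟨h1', h2'⟩ | ⟨h1', h2'⟩
        · exact Or.inr (Or.inr ⟨h, Relation.ReflTransGen.refl⟩)
        · exact Or.inl h1'
        · exact Or.inr (Or.inr ⟨h1', Relation.ReflTransGen.refl⟩)
  · intro h
    rcases h with h | ⟨h1, h2⟩ | ⟨h1, h2⟩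
    · exact pvConn_mono P u v h
    · exact pvConn_trans _ (pvConn_mono P u v h1)
        (pvConn_trans _ (pvConn_edge P u v) (pvConn_mono P u v h2))
    · exact pvConn_trans _ (pvConn_mono P u v h1)
        (pvConn_trans _ (pvConn_symm _ (pvConn_edge P u v)) (pvConn_mono P u v h2))

def pvBInv (P : List (Int × Int)) (groups : List (List Int)) : Prop :=
  groups.flatten.Nodup ∧
  (∀ g ∈ groups, ∀ x ∈ g, ∀ y, (pvConn P x y ↔ y ∈ g)) ∧
  (∀ x, x ∈ groups.flatten ↔ ∃ z, pvRel P x z)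

theorem pvBInv_nil : pvBInv [] [] := by
  refine ⟨by simp, by simp, ?_⟩
  intro x; simp [pvRel]

theorem pvBInv_step (P : List (Int × Int)) (groups : List (List Int)) (u v : Int)
    (h : pvBInv P groups) : pvBInv (P ++ [(u, v)]) (pvMergeStep groups (u, v)) := by
  obtain ⟨hnd, hcls, hnodes⟩ := h
  set P' := P ++ [(u, v)] with hP'
  -- the touching / untouched split
  set t : List Int → Bool := fun g => g.contains u || g.contains v with ht
  have hcompl : ∀ g : List Int, (!(g.contains u) && !(g.contains v)) = !t g := by
    intro g; simp [ht]
  set T := groups.filter t with hT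
  set rest := groups.filter (fun g => !t g) with hrest
  set merged := T.flatten with hmerged
  have hstep : pvMergeStep groups (u, v) = rest ++ [
      (if v ∈ (if u ∈ merged then merged else merged ++ [u])
        then (if u ∈ merged then merged else merged ++ [u])
        else (if u ∈ merged then merged else merged ++ [u]) ++ [v])] := by
    simp only [pvMergeStep, List.flatMap_id]
    rw [List.filter_congr (fun g _ => hcompl g)]
  set merged1 := if u ∈ merged then merged else merged ++ [u] with hm1
  set merged2 := if v ∈ merged1 then merged1 else merged1 ++ [v] with hm2
  -- permutation bookkeeping
  have hperm : (T ++ rest).Perm groups := List.filter_append_perm t groups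
  have hfl : (T.flatten ++ rest.flatten).Perm groups.flatten := by
    have := hperm.flatten; rwa [List.flatten_append] at this
  have hnd2 : (T.flatten ++ rest.flatten).Nodup := hfl.nodup_iff.2 hnd
  have hndT : merged.Nodup := (List.nodup_append.1 hnd2).1
  have hndR : rest.flatten.Nodup := (List.nodup_append.1 hnd2).2.1
  have hdisj : ∀ x ∈ merged, x ∉ rest.flatten := by
    intro x hx hx'
    exact ((List.nodup_append.1 hnd2).2.2 x hx x hx') rfl
  have hmemG : ∀ x, x ∈ groups.flatten ↔ x ∈ merged ∨ x ∈ rest.flatten := by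
    intro x
    rw [← hfl.mem_iff, List.mem_append]
  -- membership in merged2
  have hm1mem : ∀ y, y ∈ merged1 ↔ y ∈ merged ∨ y = u := by
    intro y; rw [hm1]; split_ifs with h
    · exact ⟨Or.inl, fun hy => hy.elim id (fun hy => hy ▸ h)⟩
    · simp [List.mem_append]
  have hm2mem : ∀ y, y ∈ merged2 ↔ y ∈ merged ∨ y = u ∨ y = v := by
    intro y; rw [hm2]; split_ifs with h
    · rw [hm1mem]
      have hv := (hm1mem v).1 h
      constructor
      · tauto
      · rintro (hy | rfl | rfl)
        · exact Or.inl hy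
        · exact Or.inr rfl
        · exact hv
    · simp only [List.mem_append, List.mem_singleton, hm1mem]; tauto
  -- elements of a touching group are P'-connected to u
  have hTconn : ∀ y ∈ merged, pvConn P' u y := by
    intro y hy
    rw [hmerged, List.mem_flatten] at hy
    obtain ⟨g, hgT, hyg⟩ := hy
    rw [hT, List.mem_filter] at hgT
    obtain ⟨hgG, hgt⟩ := hgT
    rcases Bool.or_eq_true_iff.1 hgt with hu | hv
    · have := (hcls g hgG u (List.contains_iff_mem.1 hu) y).2 hyg
      exact pvConn_mono P u v this
    · have := (hcls g hgG v (List.contains_iff_mem.1 hv) y).2 hyg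
      exact pvConn_trans _ (pvConn_edge P u v) (pvConn_mono P u v this)
  have hm2conn : ∀ y ∈ merged2, pvConn P' u y := by
    intro y hy
    rcases (hm2mem y).1 hy with h | h | h
    · exact hTconn y h
    · rw [h]
      exact Relation.ReflTransGen.refl
    · rw [h]; exact pvConn_edge P u v
  -- anything P-connected to u (resp. v) lies in merged2
  have hreach : ∀ (w : Int), (w = u ∨ w = v) → ∀ y, pvConn P w y → y ∈ merged2 := by
    intro w hw y hconn
    by_cases hwy : w = y
    · subst hwy; rw [hm2mem]; tauto
    · obtain ⟨z, hz⟩ := pvConn_head P hconn hwy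
      have hwG : w ∈ groups.flatten := (hnodes w).2 ⟨z, hz⟩
      rw [List.mem_flatten] at hwG
      obtain ⟨g, hgG, hwg⟩ := hwG
      have hyg : y ∈ g := (hcls g hgG w hwg y).1 hconn
      have hgT : g ∈ T := by
        rw [hT, List.mem_filter]
        refine ⟨hgG, ?_⟩
        rw [ht]
        simp only [Bool.or_eq_true, List.contains_iff_mem]
        rcases hw with rfl | rfl
        · exact Or.inl hwg
        · exact Or.inr hwg
      have : y ∈ merged := by rw [hmerged, List.mem_flatten]; exact ⟨g, hgT, hyg⟩
      rw [hm2mem]; tauto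
  -- full characterisation of merged2
  have hm2iff : ∀ y, y ∈ merged2 ↔ pvConn P' u y := by
    intro y
    refine ⟨hm2conn y, ?_⟩
    intro hconn
    rcases (pvConn_append P u v u y).1 hconn with h | ⟨_, h2⟩ | ⟨h1, h2⟩
    · exact hreach u (Or.inl rfl) y h
    · exact hreach v (Or.inr rfl) y h2
    · exact hreach u (Or.inl rfl) y h2
  constructor
  · -- Nodup of the new flatten
    rw [hstep]
    simp only [List.flatten_append, List.flatten_cons, List.flatten_nil, List.append_nil]
    rw [List.nodup_append]
    refine ⟨hndR, ?_, ?_⟩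
    · -- merged2 nodup
      have h1 : merged1.Nodup := by
        rw [hm1]; split_ifs with h
        · exact hndT
        · rw [List.nodup_append]
          refine ⟨hndT, List.nodup_singleton _, ?_⟩
          intro a ha b hb
          simp only [List.mem_singleton] at hb
          subst hb
          intro heq
          exact h (heq ▸ ha)
      rw [hm2]; split_ifs with h
      · exact h1
      · rw [List.nodup_append]
        refine ⟨h1, List.nodup_singleton _, ?_⟩
        intro a ha b hb
        simp only [List.mem_singleton] at hb
        subst hb
        intro heq
        exact h (heq ▸ ha)
    · -- disjoint
      intro a ha b hb heq
      have hnotR : ∀ w, w ∈ rest.flatten → (w = u ∨ w = v) → False := by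
        intro w hw hwuv
        rw [List.mem_flatten] at hw
        obtain ⟨g, hg, hwg⟩ := hw
        have h2 : u ∉ g ∧ v ∉ g := by
          have := (List.mem_filter.1 hg).2
          rw [ht] at this; simpa using this
        rcases hwuv with rfl | rfl
        · exact h2.1 hwg
        · exact h2.2 hwg
      rcases (hm2mem b).1 hb with h | h | h
      · exact hdisj b h (heq ▸ ha)
      · exact hnotR a ha (Or.inl (heq ▸ h))
      · exact hnotR a ha (Or.inr (heq ▸ h))
  constructor
  · -- classes
    intro g hg x hxg y
    rw [hstep] at hg
    rcases List.mem_append.1 hg with hgR | hgM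
    · -- untouched group
      have hgG : g ∈ groups := (List.mem_filter.1 hgR).1
      have hgnt : u ∉ g ∧ v ∉ g := by
        have := (List.mem_filter.1 hgR).2
        rw [ht] at this; simpa using this
      have hug : u ∉ g := hgnt.1
      have hvg : v ∉ g := hgnt.2
      constructor
      · intro hconn
        rcases (pvConn_append P u v x y).1 hconn with h | ⟨h1, _⟩ | ⟨h1, _⟩
        · exact (hcls g hgG x hxg y).1 h
        · exact absurd ((hcls g hgG x hxg u).1 h1) hug
        · exact absurd ((hcls g hgG x hxg v).1 h1) hvg
      · intro hyg
        exact pvConn_mono P u v ((hcls g hgG x hxg y).2 hyg)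
    · -- the merged group
      have hgm : g = merged2 := by simpa using hgM
      subst hgm
      have hux : pvConn P' u x := (hm2iff x).1 hxg
      constructor
      · intro hconn
        exact (hm2iff y).2 (pvConn_trans _ hux hconn)
      · intro hy
        exact pvConn_trans _ (pvConn_symm _ hux) ((hm2iff y).1 hy)
  · -- node coverage
    intro x
    rw [hstep]
    simp only [List.flatten_append, List.flatten_cons, List.flatten_nil, List.append_nil,
      List.mem_append]
    constructor
    · intro h
      rcases h with h | h
      · have : x ∈ groups.flatten := (hmemG x).2 (Or.inr h)
        obtain ⟨z, hz⟩ := (hnodes x).1 this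
        exact ⟨z, (pvRel_append P u v x z).2 (Or.inl hz)⟩
      · rcases (hm2mem x).1 h with h | h | h
        · have : x ∈ groups.flatten := (hmemG x).2 (Or.inl h)
          obtain ⟨z, hz⟩ := (hnodes x).1 this
          exact ⟨z, (pvRel_append P u v x z).2 (Or.inl hz)⟩
        · exact ⟨v, (pvRel_append P u v x v).2 (Or.inr (Or.inl ⟨h, rfl⟩))⟩
        · exact ⟨u, (pvRel_append P u v x u).2 (Or.inr (Or.inr ⟨h, rfl⟩))⟩
    · rintro ⟨z, hz⟩
      rcases (pvRel_append P u v x z).1 hz with h | ⟨hx1, _⟩ | ⟨hx1, _⟩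
      · have : x ∈ groups.flatten := (hnodes x).2 ⟨z, h⟩
        rcases (hmemG x).1 this with h' | h'
        · exact Or.inr ((hm2mem x).2 (Or.inl h'))
        · exact Or.inl h'
      · exact Or.inr ((hm2mem x).2 (Or.inr (Or.inl hx1)))
      · exact Or.inr ((hm2mem x).2 (Or.inr (Or.inr hx1)))

theorem pvBInv_fold : ∀ (Q P : List (Int × Int)) (groups : List (List Int)),
    pvBInv P groups → pvBInv (P ++ Q) (Q.foldl pvMergeStep groups) := by
  intro Q
  induction Q with
  | nil => intro P groups h; simpa using h
  | cons q Q ih =>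
    intro P groups h
    have h1 : pvBInv (P ++ [q]) (pvMergeStep groups q) := by
      have := pvBInv_step P groups q.1 q.2 h
      simpa using this
    have := ih (P ++ [q]) (pvMergeStep groups q) h1
    simpa [List.append_assoc] using this

theorem pvBInv_pairs (pairs : List (Int × Int)) : pvBInv pairs (pairs.foldl pvMergeStep []) := by
  have := pvBInv_fold pairs [] [] pvBInv_nil
  simpa using this

theorem pvEmit_inner_mem (a : Int) : ∀ (L : List Int) (res : PySem.Set (Int × Int)) (q : Int × Int),
    q ∈ L.foldl (fun res b => if a < b then PySem.Set.add res (a, b) else res) res ↔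
      q ∈ res ∨ ∃ b ∈ L, a < b ∧ q = (a, b) := by
  intro L
  induction L with
  | nil => intro res q; simp
  | cons b L ih =>
    intro res q
    simp only [List.foldl_cons]
    rw [ih]
    split_ifs with hab
    · rw [PySem.Set.mem_add]
      constructor
      · rintro ((h | h) | h)
        · exact Or.inl h
        · exact Or.inr ⟨b, by simp, hab, h⟩
        · obtain ⟨c, hc, hac, hq⟩ := h
          exact Or.inr ⟨c, by simp [hc], hac, hq⟩
      · rintro (h | ⟨c, hc, hac, hq⟩)
        · exact Or.inl (Or.inl h)
        · rcases List.mem_cons.1 hc with rfl | hc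
          · exact Or.inl (Or.inr hq)
          · exact Or.inr ⟨c, hc, hac, hq⟩
    · constructor
      · rintro (h | ⟨c, hc, hac, hq⟩)
        · exact Or.inl h
        · exact Or.inr ⟨c, by simp [hc], hac, hq⟩
      · rintro (h | ⟨c, hc, hac, hq⟩)
        · exact Or.inl h
        · rcases List.mem_cons.1 hc with rfl | hc
          · exact absurd hac hab
          · exact Or.inr ⟨c, hc, hac, hq⟩

theorem pvEmit_inner_nodup (a : Int) : ∀ (L : List Int) (res : PySem.Set (Int × Int)),
    res.Nodup → (L.foldl (fun res b => if a < b then PySem.Set.add res (a, b) else res) res).Nodup := by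
  intro L
  induction L with
  | nil => intro res h; exact h
  | cons b L ih =>
    intro res h
    simp only [List.foldl_cons]
    apply ih
    split_ifs
    · exact PySem.Set.nodup_add res (a, b) h
    · exact h

theorem pvEmit_mem (g : List Int) : ∀ (L : List Int) (res : PySem.Set (Int × Int)) (q : Int × Int),
    q ∈ L.foldl (fun res a => g.foldl (fun res b => if a < b then PySem.Set.add res (a, b) else res) res) res ↔
      q ∈ res ∨ ∃ a ∈ L, ∃ b ∈ g, a < b ∧ q = (a, b) := by
  intro L
  induction L with
  | nil => intro res q; simp
  | cons a L ih =>
    intro res q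
    simp only [List.foldl_cons]
    rw [ih, pvEmit_inner_mem]
    constructor
    · rintro ((h | ⟨b, hb, hab, hq⟩) | ⟨c, hc, b, hb, hcb, hq⟩)
      · exact Or.inl h
      · exact Or.inr ⟨a, by simp, b, hb, hab, hq⟩
      · exact Or.inr ⟨c, by simp [hc], b, hb, hcb, hq⟩
    · rintro (h | ⟨c, hc, b, hb, hcb, hq⟩)
      · exact Or.inl (Or.inl h)
      · rcases List.mem_cons.1 hc with rfl | hc
        · exact Or.inl (Or.inr ⟨b, hb, hcb, hq⟩)
        · exact Or.inr ⟨c, hc, b, hb, hcb, hq⟩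

theorem pvEmit_nodup (g : List Int) (L : List Int) (res : PySem.Set (Int × Int)) (h : res.Nodup) :
    (L.foldl (fun res a => g.foldl (fun res b => if a < b then PySem.Set.add res (a, b) else res) res) res).Nodup := by
  induction L generalizing res with
  | nil => exact h
  | cons a L ih =>
    simp only [List.foldl_cons]
    exact ih _ (pvEmit_inner_nodup a g res h)

theorem pvSB_mem (groups : List (List Int)) : ∀ (res : PySem.Set (Int × Int)) (q : Int × Int),
    q ∈ groups.foldl pvEmit res ↔ q ∈ res ∨ ∃ g ∈ groups, q.1 ∈ g ∧ q.2 ∈ g ∧ q.1 < q.2 := by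
  induction groups with
  | nil => intro res q; simp
  | cons g groups ih =>
    intro res q
    simp only [List.foldl_cons]
    rw [ih]
    have : ∀ s, q ∈ pvEmit s g ↔ q ∈ s ∨ (q.1 ∈ g ∧ q.2 ∈ g ∧ q.1 < q.2) := by
      intro s
      rw [pvEmit, pvEmit_mem]
      constructor
      · rintro (h | ⟨a, ha, b, hb, hab, rfl⟩)
        · exact Or.inl h
        · exact Or.inr ⟨ha, hb, hab⟩
      · rintro (h | ⟨h1, h2, h3⟩)
        · exact Or.inl h
        · exact Or.inr ⟨q.1, h1, q.2, h2, h3, rfl⟩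
    rw [this]
    constructor
    · rintro ((h | h) | ⟨g', hg', h⟩)
      · exact Or.inl h
      · exact Or.inr ⟨g, by simp, h⟩
      · exact Or.inr ⟨g', by simp [hg'], h⟩
    · rintro (h | ⟨g', hg', h⟩)
      · exact Or.inl (Or.inl h)
      · rcases List.mem_cons.1 hg' with rfl | hg'
        · exact Or.inl (Or.inr h)
        · exact Or.inr ⟨g', hg', h⟩

theorem pvSB_nodup (groups : List (List Int)) : ∀ (res : PySem.Set (Int × Int)),
    res.Nodup → (groups.foldl pvEmit res).Nodup := by
  induction groups with
  | nil => intro res h; exact h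
  | cons g groups ih =>
    intro res h
    simp only [List.foldl_cons]
    exact ih _ (pvEmit_nodup g g res h)

def pvGoodSet (P : List (Int × Int)) (S : List (Int × Int)) : Prop :=
  S.Nodup ∧ ∀ q : Int × Int, q ∈ S ↔ q.1 < q.2 ∧ pvConn P q.1 q.2

theorem pv_sorted_unique (P : List (Int × Int)) (S T : List (Int × Int))
    (hS : pvGoodSet P S) (hT : pvGoodSet P T) :
    PySem.List.sorted S (fun p => toLex p) false = PySem.List.sorted T (fun p => toLex p) false := by
  apply PySem.List.sorted_eq_sorted_of_perm
  · exact fun a b h => by simpa using h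
  · exact (List.perm_ext_iff_of_nodup hS.1 hT.1).2 (fun q => (hS.2 q).trans (hT.2 q).symm)

theorem pvB_good (pairs : List (Int × Int)) :
    pvGoodSet pairs ((pairs.foldl pvMergeStep []).foldl pvEmit PySem.Set.empty) := by
  obtain ⟨hnd, hcls, hnodes⟩ := pvBInv_pairs pairs
  constructor
  · exact pvSB_nodup _ _ List.nodup_nil
  · intro q
    rw [pvSB_mem]
    constructor
    · rintro (h | ⟨g, hg, h1, h2, h3⟩)
      · simp [PySem.Set.empty] at h
      · exact ⟨h3, (hcls g hg q.1 h1 q.2).2 h2⟩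
    · rintro ⟨hlt, hconn⟩
      have hne : q.1 ≠ q.2 := by omega
      obtain ⟨z, hz⟩ := pvConn_head pairs hconn hne
      have h1 : q.1 ∈ (pairs.foldl pvMergeStep []).flatten := (hnodes q.1).2 ⟨z, hz⟩
      rw [List.mem_flatten] at h1
      obtain ⟨g, hg, h1g⟩ := h1
      have h2g : q.2 ∈ g := (hcls g hg q.1 h1g q.2).1 hconn
      exact Or.inr ⟨g, hg, h1g, h2g, hlt⟩

-- ========== A side ==========

-- graph building: the two appends per pair are one append per oriented edge
def pvDoubled (pairs : List (Int × Int)) : List (Int × Int) :=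
  pairs.flatMap (fun p => [(p.1, p.2), (p.2, p.1)])

theorem pvG_eq (pairs : List (Int × Int)) : ∀ d,
    pairs.foldl pvGraphAdd d =
      (pvDoubled pairs).foldl (fun d q => d.modify q.1 [] (· ++ [q.2])) d := by
  induction pairs with
  | nil => intro d; rfl
  | cons p ps ih =>
    intro d
    simp only [pvDoubled, List.flatMap_cons, List.foldl_cons, List.foldl_append] at *
    rw [ih]
    rfl

theorem pv_mem_doubled (pairs : List (Int × Int)) (x nb : Int) :
    (x, nb) ∈ pvDoubled pairs ↔ pvRel pairs x nb := by
  simp only [pvDoubled, List.mem_flatMap, pvRel, List.mem_cons,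
    List.not_mem_nil, or_false, Prod.ext_iff]
  constructor
  · rintro ⟨p, hp, (⟨h1, h2⟩ | ⟨h1, h2⟩)⟩
    · exact Or.inl (by rw [h1, h2]; simpa using hp)
    · exact Or.inr (by rw [h1, h2]; simpa using hp)
  · rintro (h | h)
    · exact ⟨(x, nb), h, Or.inl ⟨rfl, rfl⟩⟩
    · exact ⟨(nb, x), h, Or.inr ⟨rfl, rfl⟩⟩

theorem pv_adj (pairs : List (Int × Int)) (x nb : Int) :
    nb ∈ (pairs.foldl pvGraphAdd PySem.Dict.empty).getD x [] ↔ pvRel pairs x nb := by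
  rw [pvG_eq, PySem.Dict.getD_foldl_modify_append, PySem.Dict.getD_empty]
  rw [← pv_mem_doubled]
  simp only [List.nil_append, List.mem_map, List.mem_filter, beq_iff_eq]
  constructor
  · rintro ⟨q, ⟨hq, hq1⟩, hq2⟩
    rw [← hq1, ← hq2]
    simpa using hq
  · intro h
    exact ⟨(x, nb), ⟨h, rfl⟩, rfl⟩

theorem pv_keys (pairs : List (Int × Int)) (x : Int) :
    x ∈ (pairs.foldl pvGraphAdd PySem.Dict.empty).keys ↔ ∃ z, pvRel pairs x z := by
  rw [pvG_eq]
  rw [PySem.Dict.keys_foldl_modify_key (pvDoubled pairs) Prod.fst []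
    (fun _ q => (· ++ [q.2])) PySem.Dict.empty]
  rw [PySem.Dict.keys_empty, PySem.Set.update_nil_left, PySem.Set.mem_ofList]
  simp only [List.mem_map]
  constructor
  · rintro ⟨q, hq, rfl⟩
    exact ⟨q.2, (pv_mem_doubled pairs q.1 q.2).1 hq⟩
  · rintro ⟨z, hz⟩
    exact ⟨(x, z), (pv_mem_doubled pairs x z).2 hz, rfl⟩

theorem pv_adj_nil (pairs : List (Int × Int)) (x : Int)
    (h : x ∉ (pairs.foldl pvGraphAdd PySem.Dict.empty).keys) :
    (pairs.foldl pvGraphAdd PySem.Dict.empty).getD x [] = [] := by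
  rw [List.eq_nil_iff_forall_not_mem]
  intro nb hnb
  exact h ((pv_keys pairs x).2 ⟨nb, (pv_adj pairs x nb).1 hnb⟩)

theorem pv_sum_filter_le (p : Int → Bool) (m : List Int) (f : Int → Nat) :
    ((m.filter p).map f).sum ≤ (m.map f).sum := by
  induction m with
  | nil => simp
  | cons a m ih =>
    simp only [List.filter_cons]
    split_ifs <;> simp only [List.map_cons, List.sum_cons] <;> omega

theorem pv_sum_ne_le (m : List Int) (f : Int → Nat) (x : Int) (hx : x ∈ m) :
    ((m.filter (fun k => !(k == x))).map f).sum + f x ≤ (m.map f).sum := by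
  induction m with
  | nil => simp at hx
  | cons a m ih =>
    by_cases hax : a = x
    · subst hax
      rw [List.filter_cons_of_neg (by simp)]
      simp only [List.map_cons, List.sum_cons]
      have := pv_sum_filter_le (fun k => !(k == a)) m f
      omega
    · have hx' : x ∈ m := by
        rcases List.mem_cons.1 hx with rfl | h
        · exact absurd rfl hax
        · exact h
      simp only [List.filter_cons]
      rw [if_pos (by simp [hax])]
      simp only [List.map_cons, List.sum_cons]
      have := ih hx'
      omega

def pvCG (g : PySem.Dict Int (List Int)) : Int → Int → Prop :=
  Relation.ReflTransGen (fun a b => b ∈ g.getD a [])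

theorem pv_contains_false {α : Type} [BEq α] [LawfulBEq α] (s : PySem.Set α) (x : α) (h : x ∉ s) :
    PySem.Set.contains s x = false := by
  cases hc : PySem.Set.contains s x
  · rfl
  · exact absurd ((PySem.Set.contains_iff s x).1 hc) h

theorem pvPhi_step (g : PySem.Dict Int (List Int)) (vis : PySem.Set Int) (current : Int)
    (rest : List Int) (hcur : current ∉ vis)
    (hnk : current ∉ g.keys → g.getD current [] = []) :
    pvPhi g (vis ++ [current])
        (((g.getD current []).filter
          (fun nb => !(PySem.Set.contains (vis ++ [current]) nb))).reverse ++ rest) + 1 ≤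
      pvPhi g vis (current :: rest) := by
  have hpred : ∀ k, (!(PySem.Set.contains (vis ++ [current]) k)) =
      ((!(k == current)) && (!(PySem.Set.contains vis k))) := by
    intro k
    simp only [PySem.Set.contains_eq_listContains, List.contains_append]
    have h1 : List.contains [current] k = (k == current) := by
      rw [Bool.eq_iff_iff]; simp
    rw [h1, Bool.not_or, Bool.and_comm]
  have hfilter : g.keys.filter (fun k => !(PySem.Set.contains (vis ++ [current]) k)) =
      (g.keys.filter (fun k => !(PySem.Set.contains vis k))).filter (fun k => !(k == current)) := by
    rw [List.filter_filter, List.filter_congr (fun k _ => hpred k)]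
  simp only [pvPhi]
  rw [hfilter]
  simp only [List.length_append, List.length_reverse, List.length_cons]
  have hlen : ((g.getD current []).filter
      (fun nb => !(PySem.Set.contains (vis ++ [current]) nb))).length ≤
      (g.getD current []).length := List.length_filter_le _ _
  by_cases hk : current ∈ g.keys
  · have hmemf : current ∈ g.keys.filter (fun k => !(PySem.Set.contains vis k)) := by
      rw [List.mem_filter]
      refine ⟨hk, ?_⟩
      rw [pv_contains_false vis current hcur]
      rfl
    have := pv_sum_ne_le (g.keys.filter (fun k => !(PySem.Set.contains vis k)))
      (fun k => (g.getD k []).length + 1) current hmemf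
    simp only at this
    omega
  · have hadj : g.getD current [] = [] := hnk hk
    have hfe : (g.keys.filter (fun k => !(PySem.Set.contains vis k))).filter
        (fun k => !(k == current)) = g.keys.filter (fun k => !(PySem.Set.contains vis k)) := by
      apply List.filter_eq_self.2
      intro a ha
      have haK : a ∈ g.keys := (List.mem_filter.1 ha).1
      have hane : a ≠ current := fun hac => hk (hac ▸ haK)
      simp [hane]
    rw [hfe, hadj]
    simp

theorem pvDfs_main (g : PySem.Dict Int (List Int))
    (hnk : ∀ x, x ∉ g.keys → g.getD x [] = []) :
    ∀ (fuel : Nat) (stack : List Int) (vis : PySem.Set Int) (comp : List Int),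
      pvPhi g vis stack ≤ fuel → vis.Nodup →
      (∀ x ∈ vis, ∀ nb ∈ g.getD x [], nb ∈ vis ∨ nb ∈ stack) →
      ∃ newc,
        pvDfs g fuel stack vis comp = (vis ++ newc, comp ++ newc) ∧
        (∀ x ∈ newc, x ∉ vis) ∧ (vis ++ newc).Nodup ∧
        (∀ x ∈ newc, ∃ s ∈ stack, pvCG g s x) ∧
        (∀ s ∈ stack, s ∈ vis ++ newc) ∧
        (∀ x ∈ vis ++ newc, ∀ nb ∈ g.getD x [], nb ∈ vis ++ newc) := by
  intro fuel
  induction fuel with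
  | zero =>
    intro stack vis comp hphi hnd hI
    have hstack : stack = [] := by
      have : stack.length = 0 := by
        have := hphi
        simp only [pvPhi] at this
        omega
      exact List.eq_nil_of_length_eq_zero this
    subst hstack
    refine ⟨[], by simp only [List.append_nil]; rfl, by simp, by simpa using hnd, by simp, by simp, ?_⟩
    intro x hx nb hnb
    rcases hI x (by simpa using hx) nb hnb with h | h
    · simpa using h
    · simp at h
  | succ fuel ih =>
    intro stack vis comp hphi hnd hI
    match stack with
    | [] =>
      refine ⟨[], by simp only [List.append_nil]; rfl, by simp, by simpa using hnd, by simp, by simp, ?_⟩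
      intro x hx nb hnb
      rcases hI x (by simpa using hx) nb hnb with h | h
      · simpa using h
      · simp at h
    | current :: rest =>
      by_cases hcur : current ∈ vis
      · -- already visited: pop
        have hc : PySem.Set.contains vis current = true := (PySem.Set.contains_iff vis current).2 hcur
        have heq : pvDfs g (fuel + 1) (current :: rest) vis comp = pvDfs g fuel rest vis comp := by
          simp only [pvDfs, hc, if_true]
        have hphi' : pvPhi g vis rest ≤ fuel := by
          simp only [pvPhi, List.length_cons] at hphi ⊢
          omega
        have hI' : ∀ x ∈ vis, ∀ nb ∈ g.getD x [], nb ∈ vis ∨ nb ∈ rest := by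
          intro x hx nb hnb
          rcases hI x hx nb hnb with h | h
          · exact Or.inl h
          · rcases List.mem_cons.1 h with rfl | h
            · exact Or.inl hcur
            · exact Or.inr h
        obtain ⟨newc, heq2, hnv, hnd2, hreach, hstk, hcl⟩ := ih rest vis comp hphi' hnd hI'
        refine ⟨newc, heq ▸ heq2, hnv, hnd2, ?_, ?_, hcl⟩
        · intro x hx
          obtain ⟨s, hs, hconn⟩ := hreach x hx
          exact ⟨s, List.mem_cons_of_mem _ hs, hconn⟩
        · intro s hs
          rcases List.mem_cons.1 hs with rfl | hs
          · exact List.mem_append.2 (Or.inl hcur)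
          · exact hstk s hs
      · -- new node
        have hc : PySem.Set.contains vis current = false := pv_contains_false vis current hcur
        have hadd : PySem.Set.add vis current = vis ++ [current] := PySem.Set.add_of_not_mem hcur
        set vis2 : PySem.Set Int := vis ++ [current] with hvis2
        set pushed : List Int :=
          (g.getD current []).filter (fun nb => !(PySem.Set.contains vis2 nb)) with hpushed
        have heq : pvDfs g (fuel + 1) (current :: rest) vis comp =
            pvDfs g fuel (pushed.reverse ++ rest) vis2 (comp ++ [current]) := by
          simp only [pvDfs, hc, Bool.false_eq_true, if_false, hadd]
          rw [← hpushed]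
        have hphi' : pvPhi g vis2 (pushed.reverse ++ rest) ≤ fuel := by
          have := pvPhi_step g vis current rest hcur (hnk current)
          rw [← hvis2, ← hpushed] at this
          omega
        have hnd2 : vis2.Nodup := by
          rw [hvis2, List.nodup_append]
          refine ⟨hnd, List.nodup_singleton _, ?_⟩
          intro a ha b hb
          simp only [List.mem_singleton] at hb
          subst hb
          intro heq'
          exact hcur (heq' ▸ ha)
        have hI' : ∀ x ∈ vis2, ∀ nb ∈ g.getD x [], nb ∈ vis2 ∨ nb ∈ pushed.reverse ++ rest := by
          intro x hx nb hnb
          rcases List.mem_append.1 hx with hx | hx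
          · rcases hI x hx nb hnb with h | h
            · exact Or.inl (List.mem_append.2 (Or.inl h))
            · rcases List.mem_cons.1 h with rfl | h
              · exact Or.inl (List.mem_append.2 (Or.inr (by simp)))
              · exact Or.inr (List.mem_append.2 (Or.inr h))
          · simp only [List.mem_singleton] at hx
            subst hx
            by_cases hnb2 : nb ∈ vis2
            · exact Or.inl hnb2
            · refine Or.inr (List.mem_append.2 (Or.inl ?_))
              rw [List.mem_reverse, hpushed, List.mem_filter]
              exact ⟨hnb, by rw [pv_contains_false vis2 nb hnb2]; rfl⟩
        obtain ⟨newc', heq2, hnv, hnd3, hreach, hstk, hcl⟩ :=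
          ih (pushed.reverse ++ rest) vis2 (comp ++ [current]) hphi' hnd2 hI'
        refine ⟨current :: newc', ?_, ?_, ?_, ?_, ?_, ?_⟩
        · rw [heq, heq2, hvis2]
          simp
        · intro x hx
          rcases List.mem_cons.1 hx with rfl | hx
          · exact hcur
          · intro hxv
            exact hnv x hx (List.mem_append.2 (Or.inl hxv))
        · have : vis ++ current :: newc' = vis2 ++ newc' := by rw [hvis2]; simp
          rw [this]
          exact hnd3
        · intro x hx
          rcases List.mem_cons.1 hx with rfl | hx
          · exact ⟨x, by simp, Relation.ReflTransGen.refl⟩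
          · obtain ⟨s, hs, hconn⟩ := hreach x hx
            rcases List.mem_append.1 hs with hs | hs
            · rw [List.mem_reverse, hpushed, List.mem_filter] at hs
              exact ⟨current, by simp,
                Relation.ReflTransGen.trans (Relation.ReflTransGen.single hs.1) hconn⟩
            · exact ⟨s, by simp [hs], hconn⟩
        · intro s hs
          have hres : vis ++ current :: newc' = vis2 ++ newc' := by rw [hvis2]; simp
          rcases List.mem_cons.1 hs with rfl | hs
          · rw [hres]
            exact List.mem_append.2 (Or.inl (by simp [hvis2]))
          · rw [hres]
            exact hstk s (List.mem_append.2 (Or.inr hs))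
        · have hres : vis ++ current :: newc' = vis2 ++ newc' := by rw [hvis2]; simp
          rw [hres]
          exact hcl

def pvAInv (g : PySem.Dict Int (List Int)) (vis : PySem.Set Int) (comps : List (List Int)) : Prop :=
  vis.Nodup ∧ comps.flatten = vis ∧ (∀ x ∈ vis, ∀ nb ∈ g.getD x [], nb ∈ vis) ∧
  (∀ c ∈ comps, ∃ root, ∀ y, pvCG g root y ↔ y ∈ c)

theorem pvOuter (g : PySem.Dict Int (List Int))
    (hnk : ∀ x, x ∉ g.keys → g.getD x [] = [])
    (hsym : ∀ x nb, nb ∈ g.getD x [] → x ∈ g.getD nb []) :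
    ∀ (ks : List Int) (vis : PySem.Set Int) (comps : List (List Int)),
      pvAInv g vis comps →
      pvAInv g (ks.foldl
          (fun (st : PySem.Set Int × List (List Int)) node =>
            if PySem.Set.contains st.1 node then st
            else
              match pvDfs g (pvPhi g st.1 [node]) [node] st.1 [] with
              | (vis', comp) => (vis', st.2 ++ [comp])) (vis, comps)).1
        (ks.foldl
          (fun (st : PySem.Set Int × List (List Int)) node =>
            if PySem.Set.contains st.1 node then st
            else
              match pvDfs g (pvPhi g st.1 [node]) [node] st.1 [] with
              | (vis', comp) => (vis', st.2 ++ [comp])) (vis, comps)).2 ∧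
      (∀ k ∈ ks, k ∈ (ks.foldl
          (fun (st : PySem.Set Int × List (List Int)) node =>
            if PySem.Set.contains st.1 node then st
            else
              match pvDfs g (pvPhi g st.1 [node]) [node] st.1 [] with
              | (vis', comp) => (vis', st.2 ++ [comp])) (vis, comps)).1) ∧
      (∀ x ∈ vis, x ∈ (ks.foldl
          (fun (st : PySem.Set Int × List (List Int)) node =>
            if PySem.Set.contains st.1 node then st
            else
              match pvDfs g (pvPhi g st.1 [node]) [node] st.1 [] with
              | (vis', comp) => (vis', st.2 ++ [comp])) (vis, comps)).1) := by
  intro ks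
  induction ks with
  | nil =>
    intro vis comps h
    exact ⟨h, by simp, by simp⟩
  | cons k ks ih =>
    intro vis comps h
    obtain ⟨hnd, hflat, hclo, hcls⟩ := h
    simp only [List.foldl_cons]
    by_cases hk : k ∈ vis
    · have hc : PySem.Set.contains vis k = true := (PySem.Set.contains_iff vis k).2 hk
      rw [if_pos hc]
      obtain ⟨h1, h2, h3⟩ := ih vis comps ⟨hnd, hflat, hclo, hcls⟩
      exact ⟨h1, fun k' hk' => by
        rcases List.mem_cons.1 hk' with rfl | hk'
        · exact h3 k' hk
        · exact h2 k' hk', h3⟩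
    · have hc : PySem.Set.contains vis k = false := pv_contains_false vis k hk
      rw [if_neg (fun hh => hk ((PySem.Set.contains_iff vis k).1 hh))]
      have hI : ∀ x ∈ vis, ∀ nb ∈ g.getD x [], nb ∈ vis ∨ nb ∈ [k] :=
        fun x hx nb hnb => Or.inl (hclo x hx nb hnb)
      obtain ⟨newc, heq, hnv, hnd2, hreach, hstk, hcl⟩ :=
        pvDfs_main g hnk (pvPhi g vis [k]) [k] vis [] le_rfl hnd hI
      rw [heq]
      have hkin : k ∈ newc := by
        have := hstk k (by simp)
        rcases List.mem_append.1 this with h | h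
        · exact absurd h hk
        · exact h
      have hclass : ∀ y, pvCG g k y ↔ y ∈ newc := by
        intro y
        constructor
        · intro hconn
          induction hconn with
          | refl => exact hkin
          | @tail b nb h1 h2 ihh =>
            have hb : b ∈ vis ++ newc := List.mem_append.2 (Or.inr ihh)
            have hnb : nb ∈ vis ++ newc := hcl b hb nb h2
            rcases List.mem_append.1 hnb with hnbv | hnbn
            · have : b ∈ vis := hclo nb hnbv b (hsym b nb h2)
              exact absurd this (hnv b ihh)
            · exact hnbn
        · intro hy
          obtain ⟨s, hs, hconn⟩ := hreach y hy
          simp only [List.mem_singleton] at hs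
          exact hs ▸ hconn
      have hInv2 : pvAInv g (vis ++ newc) (comps ++ [newc]) := by
        refine ⟨hnd2, ?_, hcl, ?_⟩
        · rw [List.flatten_append, hflat]
          simp
        · intro c hc'
          rcases List.mem_append.1 hc' with hc' | hc'
          · exact hcls c hc'
          · simp only [List.mem_singleton] at hc'
            subst hc'
            exact ⟨k, hclass⟩
      obtain ⟨h1, h2, h3⟩ := ih (vis ++ newc) (comps ++ [newc]) hInv2
      refine ⟨h1, ?_, ?_⟩
      · intro k' hk'
        rcases List.mem_cons.1 hk' with rfl | hk'
        · exact h3 k' (List.mem_append.2 (Or.inr hkin))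
        · exact h2 k' hk'
      · intro x hx
        exact h3 x (List.mem_append.2 (Or.inl hx))

theorem pvCG_iff (pairs : List (Int × Int)) (x y : Int) :
    pvCG (pairs.foldl pvGraphAdd PySem.Dict.empty) x y ↔ pvConn pairs x y := by
  constructor
  · exact Relation.ReflTransGen.mono (fun a b h => (pv_adj pairs a b).1 h)
  · exact Relation.ReflTransGen.mono (fun a b h => (pv_adj pairs a b).2 h)

theorem pvComponents_spec (pairs : List (Int × Int)) :
    (pvComponents pairs).flatten.Nodup ∧
    (∀ x, (∃ z, pvRel pairs x z) → x ∈ (pvComponents pairs).flatten) ∧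
    (∀ c ∈ pvComponents pairs, ∃ root, ∀ y, pvConn pairs root y ↔ y ∈ c) := by
  set G := pairs.foldl pvGraphAdd PySem.Dict.empty with hG
  have hnk : ∀ x, x ∉ G.keys → G.getD x [] = [] := fun x h => pv_adj_nil pairs x h
  have hsym : ∀ x nb, nb ∈ G.getD x [] → x ∈ G.getD nb [] := by
    intro x nb h
    exact (pv_adj pairs nb x).2 (pvRel_symm pairs ((pv_adj pairs x nb).1 h))
  have hbase : pvAInv G PySem.Set.empty [] := by
    refine ⟨List.nodup_nil, rfl, ?_, by simp⟩
    intro x hx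
    simp [PySem.Set.empty] at hx
  obtain ⟨⟨hnd, hflat, _, hcls⟩, hkeys, _⟩ := pvOuter G hnk hsym G.keys PySem.Set.empty [] hbase
  have hcomps : pvComponents pairs =
      (G.keys.foldl
        (fun (st : PySem.Set Int × List (List Int)) node =>
          if PySem.Set.contains st.1 node then st
          else
            match pvDfs G (pvPhi G st.1 [node]) [node] st.1 [] with
            | (vis', comp) => (vis', st.2 ++ [comp])) (PySem.Set.empty, [])).2 := rfl
  rw [hcomps]
  refine ⟨hflat ▸ hnd, ?_, ?_⟩
  · intro x hx
    rw [hflat]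
    exact hkeys x ((pv_keys pairs x).2 hx)
  · intro c hc
    obtain ⟨root, hroot⟩ := hcls c hc
    exact ⟨root, fun y => (pvCG_iff pairs root y).symm.trans (hroot y)⟩

theorem pvAdd_step (s : PySem.Set (Int × Int)) (hnds : s.Nodup) (hinv : ∀ q ∈ s, q.1 < q.2)
    (ci cj : Int) (hne : ci ≠ cj) :
    ((if !(PySem.Set.contains s (ci, cj)) && !(PySem.Set.contains s (cj, ci)) then
        (if cj ≥ ci then PySem.Set.add s (ci, cj) else PySem.Set.add s (cj, ci))
      else s).Nodup ∧
     (∀ q ∈ (if !(PySem.Set.contains s (ci, cj)) && !(PySem.Set.contains s (cj, ci)) then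
        (if cj ≥ ci then PySem.Set.add s (ci, cj) else PySem.Set.add s (cj, ci))
      else s), q.1 < q.2) ∧
     (∀ q, q ∈ (if !(PySem.Set.contains s (ci, cj)) && !(PySem.Set.contains s (cj, ci)) then
        (if cj ≥ ci then PySem.Set.add s (ci, cj) else PySem.Set.add s (cj, ci))
      else s) ↔ q ∈ s ∨ q = (min ci cj, max ci cj))) := by
  split_ifs with htest hord
  · have hlt : ci < cj := lt_of_le_of_ne hord hne
    have hmm : (min ci cj, max ci cj) = (ci, cj) := by
      rw [min_eq_left hlt.le, max_eq_right hlt.le]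
    refine ⟨PySem.Set.nodup_add s (ci, cj) hnds, ?_, ?_⟩
    · intro q hq
      rcases (PySem.Set.mem_add s (ci, cj) q).1 hq with h | h
      · exact hinv q h
      · rw [h]; exact hlt
    · intro q
      rw [PySem.Set.mem_add, hmm]
  · have hlt : cj < ci := lt_of_not_ge hord
    have hmm : (min ci cj, max ci cj) = (cj, ci) := by
      rw [min_eq_right hlt.le, max_eq_left hlt.le]
    refine ⟨PySem.Set.nodup_add s (cj, ci) hnds, ?_, ?_⟩
    · intro q hq
      rcases (PySem.Set.mem_add s (cj, ci) q).1 hq with h | h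
      · exact hinv q h
      · rw [h]; exact hlt
    · intro q
      rw [PySem.Set.mem_add, hmm]
  · have hmem : (ci, cj) ∈ s ∨ (cj, ci) ∈ s := by
      by_contra hcon
      rw [not_or] at hcon
      exact htest (by rw [pv_contains_false s (ci, cj) hcon.1, pv_contains_false s (cj, ci) hcon.2]; rfl)
    have hq : (min ci cj, max ci cj) ∈ s := by
      rcases hmem with h | h
      · have hlt := hinv _ h
        simp only at hlt
        rw [min_eq_left hlt.le, max_eq_right hlt.le]
        exact h
      · have hlt := hinv _ h
        simp only at hlt
        rw [min_eq_right hlt.le, max_eq_left hlt.le]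
        exact h
    exact ⟨hnds, hinv, fun q => ⟨fun h => Or.inl h, fun h => h.elim id (fun he => he ▸ hq)⟩⟩

theorem pvAdd_inner (comp : List Int) (i : Int) :
    ∀ (J : List Int) (s : PySem.Set (Int × Int)), s.Nodup → (∀ q ∈ s, q.1 < q.2) →
    (∀ j ∈ J, PySem.List.pyGetD comp i 0 ≠ PySem.List.pyGetD comp j 0) →
    (J.foldl (fun s j =>
        let ci := PySem.List.pyGetD comp i 0
        let cj := PySem.List.pyGetD comp j 0
        if !(PySem.Set.contains s (ci, cj)) && !(PySem.Set.contains s (cj, ci)) then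
          if cj ≥ ci then PySem.Set.add s (ci, cj) else PySem.Set.add s (cj, ci)
        else s) s).Nodup ∧
    (∀ q ∈ (J.foldl (fun s j =>
        let ci := PySem.List.pyGetD comp i 0
        let cj := PySem.List.pyGetD comp j 0
        if !(PySem.Set.contains s (ci, cj)) && !(PySem.Set.contains s (cj, ci)) then
          if cj ≥ ci then PySem.Set.add s (ci, cj) else PySem.Set.add s (cj, ci)
        else s) s), q.1 < q.2) ∧
    (∀ q, q ∈ (J.foldl (fun s j =>
        let ci := PySem.List.pyGetD comp i 0
        let cj := PySem.List.pyGetD comp j 0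
        if !(PySem.Set.contains s (ci, cj)) && !(PySem.Set.contains s (cj, ci)) then
          if cj ≥ ci then PySem.Set.add s (ci, cj) else PySem.Set.add s (cj, ci)
        else s) s) ↔ q ∈ s ∨ ∃ j ∈ J,
          q = (min (PySem.List.pyGetD comp i 0) (PySem.List.pyGetD comp j 0),
               max (PySem.List.pyGetD comp i 0) (PySem.List.pyGetD comp j 0))) := by
  intro J
  induction J with
  | nil => intro s h1 h2 _; exact ⟨h1, h2, fun q => by simp⟩
  | cons j J ih =>
    intro s h1 h2 hvals
    simp only [List.foldl_cons]
    obtain ⟨s1, s2, s3⟩ := pvAdd_step s h1 h2 (PySem.List.pyGetD comp i 0)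
      (PySem.List.pyGetD comp j 0) (hvals j (by simp))
    obtain ⟨r1, r2, r3⟩ := ih _ s1 s2 (fun j' hj' => hvals j' (by simp [hj']))
    refine ⟨r1, r2, ?_⟩
    intro q
    rw [r3, s3]
    constructor
    · rintro ((h | h) | ⟨j', hj', h⟩)
      · exact Or.inl h
      · exact Or.inr ⟨j, by simp, h⟩
      · exact Or.inr ⟨j', by simp [hj'], h⟩
    · rintro (h | ⟨j', hj', h⟩)
      · exact Or.inl (Or.inl h)
      · rcases List.mem_cons.1 hj' with rfl | hj'
        · exact Or.inl (Or.inr h)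
        · exact Or.inr ⟨j', hj', h⟩

theorem pvAddPairs_spec (comp : List Int) (hnd : comp.Nodup) (s : PySem.Set (Int × Int))
    (hnds : s.Nodup) (hinv : ∀ q ∈ s, q.1 < q.2) :
    (pvAddPairs s comp).Nodup ∧ (∀ q ∈ pvAddPairs s comp, q.1 < q.2) ∧
    (∀ q, q ∈ pvAddPairs s comp ↔ q ∈ s ∨ (q.1 < q.2 ∧ q.1 ∈ comp ∧ q.2 ∈ comp)) := by
  have hval_ne : ∀ i j : Int, 0 ≤ i → i < comp.length → i < j → j < comp.length →
      PySem.List.pyGetD comp i 0 ≠ PySem.List.pyGetD comp j 0 := by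
    intro i j h0 h1 h2 h3 heq
    rw [PySem.List.pyGetD_eq_getElem comp 0 h0 (by exact_mod_cast h1),
        PySem.List.pyGetD_eq_getElem comp 0 (by omega) (by exact_mod_cast h3)] at heq
    have := (List.Nodup.getElem_inj_iff hnd).1 heq
    omega
  have main : ∀ (I : List Int) (s : PySem.Set (Int × Int)), s.Nodup → (∀ q ∈ s, q.1 < q.2) →
      (∀ i ∈ I, 0 ≤ i ∧ i < (comp.length : Int)) →
      (I.foldl (fun s i =>
        (PySem.List.pyRange (i + 1) comp.length).foldl
          (fun s j =>
            let ci := PySem.List.pyGetD comp i 0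
            let cj := PySem.List.pyGetD comp j 0
            if !(PySem.Set.contains s (ci, cj)) && !(PySem.Set.contains s (cj, ci)) then
              if cj ≥ ci then PySem.Set.add s (ci, cj) else PySem.Set.add s (cj, ci)
            else s) s) s).Nodup ∧
      (∀ q ∈ (I.foldl (fun s i =>
        (PySem.List.pyRange (i + 1) comp.length).foldl
          (fun s j =>
            let ci := PySem.List.pyGetD comp i 0
            let cj := PySem.List.pyGetD comp j 0
            if !(PySem.Set.contains s (ci, cj)) && !(PySem.Set.contains s (cj, ci)) then
              if cj ≥ ci then PySem.Set.add s (ci, cj) else PySem.Set.add s (cj, ci)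
            else s) s) s), q.1 < q.2) ∧
      (∀ q, q ∈ (I.foldl (fun s i =>
        (PySem.List.pyRange (i + 1) comp.length).foldl
          (fun s j =>
            let ci := PySem.List.pyGetD comp i 0
            let cj := PySem.List.pyGetD comp j 0
            if !(PySem.Set.contains s (ci, cj)) && !(PySem.Set.contains s (cj, ci)) then
              if cj ≥ ci then PySem.Set.add s (ci, cj) else PySem.Set.add s (cj, ci)
            else s) s) s) ↔ q ∈ s ∨ ∃ i ∈ I, ∃ j, i < j ∧ j < (comp.length : Int) ∧
          q = (min (PySem.List.pyGetD comp i 0) (PySem.List.pyGetD comp j 0),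
               max (PySem.List.pyGetD comp i 0) (PySem.List.pyGetD comp j 0))) := by
    intro I
    induction I with
    | nil => intro s h1 h2 _; exact ⟨h1, h2, fun q => by simp⟩
    | cons i I ih =>
      intro s h1 h2 hbds
      simp only [List.foldl_cons]
      have hibd := hbds i (by simp)
      obtain ⟨s1, s2, s3⟩ := pvAdd_inner comp i (PySem.List.pyRange (i + 1) comp.length) s h1 h2
        (by
          intro j hj
          rw [PySem.List.mem_pyRange_one] at hj
          exact hval_ne i j hibd.1 hibd.2 (by omega) hj.2)
      obtain ⟨r1, r2, r3⟩ := ih _ s1 s2 (fun i' hi' => hbds i' (by simp [hi']))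
      refine ⟨r1, r2, ?_⟩
      intro q
      rw [r3, s3]
      constructor
      · rintro ((h | ⟨j, hj, h⟩) | ⟨i', hi', j, hj1, hj2, h⟩)
        · exact Or.inl h
        · rw [PySem.List.mem_pyRange_one] at hj
          exact Or.inr ⟨i, by simp, j, by omega, hj.2, h⟩
        · exact Or.inr ⟨i', by simp [hi'], j, hj1, hj2, h⟩
      · rintro (h | ⟨i', hi', j, hj1, hj2, h⟩)
        · exact Or.inl (Or.inl h)
        · rcases List.mem_cons.1 hi' with rfl | hi'
          · exact Or.inl (Or.inr ⟨j, (PySem.List.mem_pyRange_one).2 ⟨by omega, hj2⟩, h⟩)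
          · exact Or.inr ⟨i', hi', j, hj1, hj2, h⟩
  obtain ⟨r1, r2, r3⟩ := main (PySem.List.pyRange 0 comp.length) s hnds hinv
    (by intro i hi; rw [PySem.List.mem_pyRange_one] at hi; exact hi)
  refine ⟨r1, r2, ?_⟩
  intro q
  rw [pvAddPairs, r3]
  constructor
  · rintro (h | ⟨i, hi, j, hj1, hj2, h⟩)
    · exact Or.inl h
    · rw [PySem.List.mem_pyRange_one] at hi
      have h0i : (0:Int) ≤ i := hi.1
      have h0j : (0:Int) ≤ j := by omega
      have hgi := PySem.List.pyGetD_eq_getElem comp 0 h0i (by exact_mod_cast hi.2)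
      have hgj := PySem.List.pyGetD_eq_getElem comp 0 h0j (by exact_mod_cast hj2)
      have hne := hval_ne i j h0i hi.2 hj1 hj2
      refine Or.inr ?_
      rcases lt_or_gt_of_ne hne with hlt | hlt
      · rw [h, min_eq_left hlt.le, max_eq_right hlt.le]
        refine ⟨hlt, ?_, ?_⟩
        · rw [hgi]; exact List.getElem_mem _
        · rw [hgj]; exact List.getElem_mem _
      · rw [h, min_eq_right hlt.le, max_eq_left hlt.le]
        refine ⟨hlt, ?_, ?_⟩
        · rw [hgj]; exact List.getElem_mem _
        · rw [hgi]; exact List.getElem_mem _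
  · rintro (h | ⟨hlt, h1m, h2m⟩)
    · exact Or.inl h
    · obtain ⟨a, ha, hga⟩ := List.mem_iff_getElem.1 h1m
      obtain ⟨b, hb, hgb⟩ := List.mem_iff_getElem.1 h2m
      have hab : a ≠ b := by
        intro hc
        subst hc
        rw [hga] at hgb
        omega
      have hga' : PySem.List.pyGetD comp (a : Int) 0 = q.1 := by
        rw [PySem.List.pyGetD_eq_getElem comp 0 (by positivity) (by exact_mod_cast ha)]
        simpa using hga
      have hgb' : PySem.List.pyGetD comp (b : Int) 0 = q.2 := by
        rw [PySem.List.pyGetD_eq_getElem comp 0 (by positivity) (by exact_mod_cast hb)]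
        simpa using hgb
      rcases Nat.lt_or_ge a b with hab' | hab'
      · refine Or.inr ⟨(a : Int), ?_, (b : Int), by exact_mod_cast hab', by exact_mod_cast hb, ?_⟩
        · rw [PySem.List.mem_pyRange_one]
          constructor
          · positivity
          · exact_mod_cast ha
        · rw [hga', hgb', min_eq_left hlt.le, max_eq_right hlt.le]
      · have hba : b < a := by omega
        refine Or.inr ⟨(b : Int), ?_, (a : Int), by exact_mod_cast hba, by exact_mod_cast ha, ?_⟩
        · rw [PySem.List.mem_pyRange_one]
          constructor
          · positivity
          · exact_mod_cast hb
        · rw [hgb', hga', min_eq_right hlt.le, max_eq_left hlt.le]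

theorem pvSA_spec (comps : List (List Int)) (hall : ∀ c ∈ comps, c.Nodup) :
    ∀ (s : PySem.Set (Int × Int)), s.Nodup → (∀ q ∈ s, q.1 < q.2) →
    (comps.foldl pvAddPairs s).Nodup ∧ (∀ q ∈ comps.foldl pvAddPairs s, q.1 < q.2) ∧
    (∀ q, q ∈ comps.foldl pvAddPairs s ↔ q ∈ s ∨ ∃ c ∈ comps, q.1 < q.2 ∧ q.1 ∈ c ∧ q.2 ∈ c) := by
  induction comps with
  | nil => intro s h1 h2; exact ⟨h1, h2, fun q => by simp⟩
  | cons c comps ih =>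
    intro s h1 h2
    simp only [List.foldl_cons]
    obtain ⟨s1, s2, s3⟩ := pvAddPairs_spec c (hall c (by simp)) s h1 h2
    obtain ⟨r1, r2, r3⟩ := ih (fun c' hc' => hall c' (by simp [hc'])) _ s1 s2
    refine ⟨r1, r2, ?_⟩
    intro q
    rw [r3, s3]
    constructor
    · rintro ((h | h) | ⟨c', hc', h⟩)
      · exact Or.inl h
      · exact Or.inr ⟨c, by simp, h.1, h.2⟩
      · exact Or.inr ⟨c', by simp [hc'], h⟩
    · rintro (h | ⟨c', hc', h⟩)
      · exact Or.inl (Or.inl h)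
      · rcases List.mem_cons.1 hc' with rfl | hc'
        · exact Or.inl (Or.inr ⟨h.1, h.2⟩)
        · exact Or.inr ⟨c', hc', h⟩

theorem pvA_good (pairs : List (Int × Int)) :
    pvGoodSet pairs ((pvComponents pairs).foldl pvAddPairs PySem.Set.empty) := by
  obtain ⟨hndfl, hcover, hcls⟩ := pvComponents_spec pairs
  have hall : ∀ c ∈ pvComponents pairs, c.Nodup := by
    intro c hc
    exact (List.nodup_flatten.1 hndfl).1 c hc
  obtain ⟨r1, r2, r3⟩ := pvSA_spec (pvComponents pairs) hall PySem.Set.empty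
    List.nodup_nil (by simp [PySem.Set.empty])
  refine ⟨r1, ?_⟩
  intro q
  rw [r3]
  constructor
  · rintro (h | ⟨c, hc, hlt, h1, h2⟩)
    · simp [PySem.Set.empty] at h
    · obtain ⟨root, hroot⟩ := hcls c hc
      exact ⟨hlt, pvConn_trans pairs (pvConn_symm pairs ((hroot q.1).2 h1)) ((hroot q.2).2 h2)⟩
  · rintro ⟨hlt, hconn⟩
    have hne : q.1 ≠ q.2 := by omega
    obtain ⟨z, hz⟩ := pvConn_head pairs hconn hne
    have h1 : q.1 ∈ (pvComponents pairs).flatten := hcover q.1 ⟨z, hz⟩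
    rw [List.mem_flatten] at h1
    obtain ⟨c, hc, h1c⟩ := h1
    obtain ⟨root, hroot⟩ := hcls c hc
    have h2c : q.2 ∈ c := (hroot q.2).1 (pvConn_trans pairs ((hroot q.1).2 h1c) hconn)
    exact Or.inr ⟨c, hc, hlt, h1c, h2c⟩

-- ===== VERDICT (by name: the statement is the Claim_ definition above) =====
theorem extend_matches_spec : Claim_equal_extend_matches := by
  intro pairs _
  show extend_matches pairs = extend_matches_alt pairs
  exact pv_sorted_unique pairs _ _ (pvA_good pairs) (pvB_good pairs)
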